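-- pv_equiv track=rewrite | github.com/charlieweinberger/math | Math_Academy/quotient_groups.py | list_mult
-- ===== SOURCE A (Python) =====
-- def set_part(tri_elem, mod, operation):
--     ans = []
--
--     var = 1
--     while var not in ans:
--         ans.append(var)
--
--         if operation == '+':
--             var = (var + tri_elem) % mod
--         if operation == '*':
--             var = (var * tri_elem) % mod
--
--     return sorted(ans)
--
-- def list_mult(scalar, tri_elem, mod, operation):
--     ans = []
--     for n in set_part(tri_elem, mod, operation):
--         if operation == '+':
--             ans.append((scalar + n) % mod)
--         if operation == '*':
--             ans.append(scalar * n % mod)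
--     return sorted(ans)
-- ===== SOURCE B (Python) =====
-- def list_mult(scalar, tri_elem, mod, operation):
--     seen = set()
--     result = []
--     var = 1
--     while var not in seen:
--         seen.add(var)
--         if operation == '+':
--             result.append((scalar + var) % mod)
--             var = (var + tri_elem) % mod
--         elif operation == '*':
--             result.append(scalar * var % mod)
--             var = var * tri_elem % mod
--     return sorted(result)
-- ===== Notes on version B (the rewrite author's own statement) =====
-- stated objective: simpler
-- what changed: B fuses A's two passes (set_part's orbit loop + sort, then a second mapping loop + sort) into one while loop that tracks visited orbit elements in a set and appends the scalar-mapped value directly, with a single final sort and no set_part helper.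
import Mathlib
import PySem

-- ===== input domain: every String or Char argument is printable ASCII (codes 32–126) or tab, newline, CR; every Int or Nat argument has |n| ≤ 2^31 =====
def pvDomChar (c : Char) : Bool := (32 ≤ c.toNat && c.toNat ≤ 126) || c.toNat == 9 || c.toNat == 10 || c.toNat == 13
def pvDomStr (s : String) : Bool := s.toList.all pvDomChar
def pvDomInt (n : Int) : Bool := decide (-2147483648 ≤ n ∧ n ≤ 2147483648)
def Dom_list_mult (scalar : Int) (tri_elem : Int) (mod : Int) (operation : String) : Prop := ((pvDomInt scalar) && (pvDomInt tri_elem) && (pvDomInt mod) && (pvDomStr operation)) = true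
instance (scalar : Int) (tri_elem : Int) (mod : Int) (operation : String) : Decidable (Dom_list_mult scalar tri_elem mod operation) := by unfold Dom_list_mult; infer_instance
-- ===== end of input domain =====

-- B fuses A's two passes (orbit generation, then scalar mapping) into one loop with a
-- `seen` set, eliminating the `set_part` helper and its intermediate sort (objective: simpler).

-- ===== PORT A =====
-- while loop of set_part; fuel bounds the iterations, the real guard is `var ∈ ans`
def setPartLoop (tri_elem : Int) (md : Int) (operation : String) : Nat → List Int → Int → List Int
  | 0, ans, _ => ans
  | fuel+1, ans, var =>
    if var ∈ ans then ans
    else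
      let ans' := ans ++ [var]
      let v1 := if operation == "+" then PySem.Int.mod (var + tri_elem) md else var
      let v2 := if operation == "*" then PySem.Int.mod (v1 * tri_elem) md else v1
      setPartLoop tri_elem md operation fuel ans' v2

def set_part (tri_elem : Int) (md : Int) (operation : String) : List Int :=
  PySem.List.sorted (setPartLoop tri_elem md operation (md.natAbs + 2) [] 1) (fun x => x) false

def list_mult (scalar : Int) (tri_elem : Int) (mod : Int) (operation : String) : List Int :=
  let ans := (set_part tri_elem mod operation).foldl (fun ans n =>
    let ans1 := if operation == "+" then ans ++ [PySem.Int.mod (scalar + n) mod] else ans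
    if operation == "*" then ans1 ++ [PySem.Int.mod (scalar * n) mod] else ans1) []
  PySem.List.sorted ans (fun x => x) false

-- ===== PORT B =====
-- single while loop of Source B: seen set + result list, then one final sort
def listMultLoop (scalar : Int) (tri_elem : Int) (md : Int) (operation : String) :
    Nat → PySem.Set Int → List Int → Int → List Int
  | 0, _, result, _ => result
  | fuel+1, seen, result, var =>
    if var ∈ seen then result
    else
      let seen' := PySem.Set.add seen var
      if operation == "+" then
        listMultLoop scalar tri_elem md operation fuel seen'
          (result ++ [PySem.Int.mod (scalar + var) md]) (PySem.Int.mod (var + tri_elem) md)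
      else if operation == "*" then
        listMultLoop scalar tri_elem md operation fuel seen'
          (result ++ [PySem.Int.mod (scalar * var) md]) (PySem.Int.mod (var * tri_elem) md)
      else
        listMultLoop scalar tri_elem md operation fuel seen' result var

def list_mult_alt (scalar : Int) (tri_elem : Int) (mod : Int) (operation : String) : List Int :=
  PySem.List.sorted (listMultLoop scalar tri_elem mod operation (mod.natAbs + 2) PySem.Set.empty [] 1)
    (fun x => x) false

-- ===== PRECONDITION & SPEC =====
-- Pre_ excludes only mod = 0 with operation '+' or '*', where Python A raises ZeroDivisionError
def Pre_list_mult (scalar : Int) (tri_elem : Int) (mod : Int) (operation : String) : Prop :=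
  (operation = "+" ∨ operation = "*") → mod ≠ 0
instance (scalar : Int) (tri_elem : Int) (mod : Int) (operation : String) : Decidable (Pre_list_mult scalar tri_elem mod operation) := by unfold Pre_list_mult; infer_instance

def pvWitness_list_mult : Int × Int × Int × String := (3, 2, 7, "*")

def Spec_list_mult (scalar : Int) (tri_elem : Int) (mod : Int) (operation : String) (out : List Int) : Prop := out = list_mult_alt scalar tri_elem mod operation
instance (scalar : Int) (tri_elem : Int) (mod : Int) (operation : String) (out : List Int) : Decidable (Spec_list_mult scalar tri_elem mod operation out) := by unfold Spec_list_mult; infer_instance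

-- ===== CLAIM (what is proved, stated in full; the proofs are below) =====
def Claim_equal_list_mult : Prop := ∀ (scalar : Int) (tri_elem : Int) (mod : Int) (operation : String), Dom_list_mult scalar tri_elem mod operation → Pre_list_mult scalar tri_elem mod operation → Spec_list_mult scalar tri_elem mod operation (list_mult scalar tri_elem mod operation)

-- ===== LEMMAS AND PROOFS =====

-- foldl that appends one mapped element per step is map
theorem foldl_append_map {α β : Type} (f : α → β) :
    ∀ (l : List α) (acc : List β), l.foldl (fun a n => a ++ [f n]) acc = acc ++ l.map f := by
  intro l
  induction l with
  | nil => simp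
  | cons x xs ih => intro acc; simp [List.foldl, ih]

-- '+' case: B's loop produces exactly the image of the new part of A's orbit
theorem loopRel_add (scalar tri_elem md : Int) :
    ∀ (fuel : Nat) (ans : List Int) (seen : PySem.Set Int) (res : List Int) (var : Int),
      (∀ x : Int, x ∈ seen ↔ x ∈ ans) →
      ∃ tail, setPartLoop tri_elem md "+" fuel ans var = ans ++ tail ∧
        listMultLoop scalar tri_elem md "+" fuel seen res var
          = res ++ tail.map (fun n => PySem.Int.mod (scalar + n) md) := by
  intro fuel
  induction fuel with
  | zero => intro ans seen res var _; exact ⟨[], by simp [setPartLoop], by simp [listMultLoop]⟩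
  | succ k ih =>
    intro ans seen res var h
    by_cases hv : var ∈ ans
    · refine ⟨[], ?_, ?_⟩
      · simp [setPartLoop, hv]
      · simp [listMultLoop, (h var).2 hv]
    · have hs : var ∉ seen := fun hx => hv ((h var).1 hx)
      have h' : ∀ x : Int, x ∈ PySem.Set.add seen var ↔ x ∈ ans ++ [var] := by
        intro x; simp [PySem.Set.mem_add, h x]
      obtain ⟨tail, ha, hb⟩ :=
        ih (ans ++ [var]) (PySem.Set.add seen var)
          (res ++ [PySem.Int.mod (scalar + var) md]) (PySem.Int.mod (var + tri_elem) md) h'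
      rw [PySem.Set.add_of_not_mem hs] at hb
      refine ⟨var :: tail, ?_, ?_⟩
      · simp [setPartLoop, hv, ha]
      · simp [listMultLoop, hs, hb]

-- '*' case
theorem loopRel_mul (scalar tri_elem md : Int) :
    ∀ (fuel : Nat) (ans : List Int) (seen : PySem.Set Int) (res : List Int) (var : Int),
      (∀ x : Int, x ∈ seen ↔ x ∈ ans) →
      ∃ tail, setPartLoop tri_elem md "*" fuel ans var = ans ++ tail ∧
        listMultLoop scalar tri_elem md "*" fuel seen res var
          = res ++ tail.map (fun n => PySem.Int.mod (scalar * n) md) := by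
  intro fuel
  induction fuel with
  | zero => intro ans seen res var _; exact ⟨[], by simp [setPartLoop], by simp [listMultLoop]⟩
  | succ k ih =>
    intro ans seen res var h
    by_cases hv : var ∈ ans
    · refine ⟨[], ?_, ?_⟩
      · simp [setPartLoop, hv]
      · simp [listMultLoop, (h var).2 hv]
    · have hs : var ∉ seen := fun hx => hv ((h var).1 hx)
      have h' : ∀ x : Int, x ∈ PySem.Set.add seen var ↔ x ∈ ans ++ [var] := by
        intro x; simp [PySem.Set.mem_add, h x]
      obtain ⟨tail, ha, hb⟩ :=
        ih (ans ++ [var]) (PySem.Set.add seen var)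
          (res ++ [PySem.Int.mod (scalar * var) md]) (PySem.Int.mod (var * tri_elem) md) h'
      rw [PySem.Set.add_of_not_mem hs] at hb
      refine ⟨var :: tail, ?_, ?_⟩
      · simp [setPartLoop, hv, ha]
      · simp [listMultLoop, hs, hb]

-- unknown operation: B's loop never appends
theorem loop_other (scalar tri_elem md : Int) (operation : String)
    (h1 : operation ≠ "+") (h2 : operation ≠ "*") :
    ∀ (fuel : Nat) (seen : PySem.Set Int) (res : List Int) (var : Int),
      listMultLoop scalar tri_elem md operation fuel seen res var = res := by
  intro fuel
  induction fuel with
  | zero => intro seen res var; simp [listMultLoop]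
  | succ k ih =>
    intro seen res var
    by_cases hv : var ∈ seen
    · simp [listMultLoop, hv]
    · simp [listMultLoop, hv, h1, h2, ih]

-- unknown operation: A's second loop never appends
theorem foldl_other (scalar md : Int) (operation : String)
    (h1 : operation ≠ "+") (h2 : operation ≠ "*") :
    ∀ (l : List Int) (acc : List Int),
      l.foldl (fun ans n =>
        let ans1 := if operation == "+" then ans ++ [PySem.Int.mod (scalar + n) md] else ans
        if operation == "*" then ans1 ++ [PySem.Int.mod (scalar * n) md] else ans1) acc = acc := by
  intro l
  induction l with
  | nil => intro acc; simp
  | cons x xs _ => intro acc; simp [List.foldl, h1, h2]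

-- ===== VERDICT (by name: the statement is the Claim_ definition above) =====
theorem list_mult_spec : Claim_equal_list_mult := by
  intro scalar tri_elem md operation _ _
  unfold Spec_list_mult list_mult list_mult_alt set_part
  by_cases h1 : operation = "+"
  · subst h1
    obtain ⟨tail, ha, hb⟩ := loopRel_add scalar tri_elem md (md.natAbs + 2) [] PySem.Set.empty [] 1
      (by intro x; simp [PySem.Set.empty])
    simp only [List.nil_append] at ha hb
    rw [ha, hb]
    simp only []
    rw [show (fun ans n =>
        let ans1 := if ("+" : String) == "+" then ans ++ [PySem.Int.mod (scalar + n) md] else ans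
        if ("+" : String) == "*" then ans1 ++ [PySem.Int.mod (scalar * n) md] else ans1)
      = (fun ans n => ans ++ [PySem.Int.mod (scalar + n) md]) from by funext a n; simp]
    rw [foldl_append_map]
    simp only [List.nil_append]
    exact PySem.List.sorted_eq_sorted_of_perm _ _ _ (fun a b hab => hab)
      ((PySem.List.sorted_perm tail (fun x => x) false).map _)
  · by_cases h2 : operation = "*"
    · subst h2
      obtain ⟨tail, ha, hb⟩ := loopRel_mul scalar tri_elem md (md.natAbs + 2) [] PySem.Set.empty [] 1
        (by intro x; simp [PySem.Set.empty])
      simp only [List.nil_append] at ha hb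
      rw [ha, hb]
      rw [show (fun ans n =>
          let ans1 := if ("*" : String) == "+" then ans ++ [PySem.Int.mod (scalar + n) md] else ans
          if ("*" : String) == "*" then ans1 ++ [PySem.Int.mod (scalar * n) md] else ans1)
        = (fun ans n => ans ++ [PySem.Int.mod (scalar * n) md]) from by funext a n; simp]
      rw [foldl_append_map]
      simp only [List.nil_append]
      exact PySem.List.sorted_eq_sorted_of_perm _ _ _ (fun a b hab => hab)
        ((PySem.List.sorted_perm tail (fun x => x) false).map _)
    · rw [loop_other scalar tri_elem md operation h1 h2, foldl_other scalar md operation h1 h2]
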